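-- pv_equiv track=rewrite | github.com/Siddhansh-11/rocket-reels-ai | mcp-servers/script/server.py | parse_script_sections
-- ===== SOURCE A (Python) =====
-- from typing import Dict, Any, List
--
-- def parse_script_sections(script: str) -> List[Dict[str, str]]:
--     """Parse script into sections based on structure"""
--     sections = []
--
--     # Simple parsing based on line breaks and markers
--     current_section = {"content": "", "type": "intro"}
--
--     for line in script.split('\n'):
--         if line.strip():
--             if any(marker in line.upper() for marker in ["HOOK:", "PROBLEM:", "SOLUTION:", "CTA:"]):
--                 if current_section["content"]:
--                     sections.append(current_section)
--                 section_type = line.split(':')[0].lower() if ':' in line else "content"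
--                 current_section = {"content": line, "type": section_type}
--             else:
--                 current_section["content"] += "\n" + line
--
--     if current_section["content"]:
--         sections.append(current_section)
--
--     return sections
-- ===== SOURCE B (Python) =====
-- def parse_script_sections(script):
--     """Parse script into sections: first group lines into segments, then render."""
--     MARKERS = ("HOOK:", "PROBLEM:", "SOLUTION:", "CTA:")
--     segments = []  # (is_marker_led, [lines])
--     for line in script.split('\n'):
--         if not line.strip():
--             continue
--         if any(m in line.upper() for m in MARKERS):
--             segments.append((True, [line]))
--         elif segments:
--             segments[-1][1].append(line)
--         else:
--             segments.append((False, [line]))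
--     result = []
--     for marked, lines in segments:
--         if marked:
--             result.append({"content": "\n".join(lines),
--                            "type": lines[0].split(':')[0].lower()})
--         else:
--             result.append({"content": "\n" + "\n".join(lines), "type": "intro"})
--     return result
-- ===== Notes on version B (the rewrite author's own statement) =====
-- stated objective: alternative
-- what changed: Replaces A's single accumulating loop over a mutable current-section dict with a two-pass decomposition: one pass groups non-blank lines into marker-led or leading segments, a second pass renders each segment to its dict via join.
import Mathlib
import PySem

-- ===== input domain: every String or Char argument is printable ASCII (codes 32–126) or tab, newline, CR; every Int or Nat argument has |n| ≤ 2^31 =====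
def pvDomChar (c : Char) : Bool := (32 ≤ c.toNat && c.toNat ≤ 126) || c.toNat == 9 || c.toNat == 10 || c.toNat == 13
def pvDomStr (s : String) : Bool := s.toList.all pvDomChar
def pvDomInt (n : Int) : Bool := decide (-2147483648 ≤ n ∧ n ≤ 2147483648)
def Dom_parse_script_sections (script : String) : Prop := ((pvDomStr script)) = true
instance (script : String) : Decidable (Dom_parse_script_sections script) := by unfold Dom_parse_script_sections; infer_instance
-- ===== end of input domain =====

-- B regroups A's single accumulating loop into a segment-grouping pass plus a rendering pass; same result, same cost.

-- ===== PORT A =====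
-- the marker list and the marker test (the same expressions occur verbatim in both Pythons)
def pvMarkers : List String := ["HOOK:", "PROBLEM:", "SOLUTION:", "CTA:"]

def pvHit (line : String) : Bool :=
  pvMarkers.any (fun m => PySem.Str.isIn m (PySem.Str.upper line))

-- line.split(':')[0].lower() if ':' in line else "content"
def pvSecType (line : String) : String :=
  if PySem.Str.isIn ":" line then
    PySem.Str.lower (((PySem.Str.split? line ":").getD []).headD "")
  else "content"

-- the body of A's for-loop; state = (sections, current content, current type)
def pvStepA (st : List (List (String × String)) × String × String) (line : String) :
    List (List (String × String)) × String × String :=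
  let (sections, cc, ct) := st
  if PySem.Str.strip line ≠ "" then
    if pvHit line then
      let sections := if cc ≠ "" then sections ++ [[("content", cc), ("type", ct)]] else sections
      (sections, line, pvSecType line)
    else
      (sections, cc ++ "\n" ++ line, ct)
  else st

def parse_script_sections (script : String) : List (List (String × String)) :=
  let fin := ((PySem.Str.split? script "\n").getD []).foldl pvStepA ([], "", "intro")
  if fin.2.1 ≠ "" then fin.1 ++ [[("content", fin.2.1), ("type", fin.2.2)]] else fin.1

-- ===== PORT B =====
-- pass 1: group the non-blank lines into segments (marker-led = true, leading pre-marker group = false)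
def pvSegStep (segs : List (Bool × List String)) (line : String) : List (Bool × List String) :=
  if PySem.Str.strip line = "" then segs
  else if pvHit line then segs ++ [(true, [line])]
  else if segs ≠ [] then
    let l := segs.getLastD (false, [])
    segs.dropLast ++ [(l.1, l.2 ++ [line])]
  else [(false, [line])]

-- pass 2: render one segment to its dict (as an association list)
def pvEmit (seg : Bool × List String) : List (String × String) :=
  if seg.1 then
    [("content", PySem.Str.join "\n" seg.2),
     ("type", PySem.Str.lower (((PySem.Str.split? (seg.2.headD "") ":").getD []).headD ""))]
  else
    [("content", "\n" ++ PySem.Str.join "\n" seg.2), ("type", "intro")]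

def parse_script_sections_alt (script : String) : List (List (String × String)) :=
  (((PySem.Str.split? script "\n").getD []).foldl pvSegStep []).map pvEmit

-- ===== PRECONDITION & SPEC =====
def Spec_parse_script_sections (script : String) (out : List (List (String × String))) : Prop := out = parse_script_sections_alt script
instance (script : String) (out : List (List (String × String))) : Decidable (Spec_parse_script_sections script out) := by unfold Spec_parse_script_sections; infer_instance

-- ===== CLAIM (what is proved, stated in full; the proofs are below) =====
def Claim_equal_parse_script_sections : Prop := ∀ (script : String), Dom_parse_script_sections script → Spec_parse_script_sections script (parse_script_sections script)

-- ===== LEMMAS AND PROOFS =====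

-- A-state view of B's segment list
def pvContentOf : Bool × List String → String
  | (true, ls) => PySem.Str.join "\n" ls
  | (false, ls) => "\n" ++ PySem.Str.join "\n" ls

def pvTypeOf : Bool × List String → String
  | (true, ls) => PySem.Str.lower (((PySem.Str.split? (ls.headD "") ":").getD []).headD "")
  | (false, _) => "intro"

def pvToA (segs : List (Bool × List String)) : List (List (String × String)) × String × String :=
  match segs.getLast? with
  | none => ([], "", "intro")
  | some l => (segs.dropLast.map pvEmit, pvContentOf l, pvTypeOf l)

-- every segment built by pass 1 carries a nonempty first line
def pvGood (segs : List (Bool × List String)) : Prop :=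
  ∀ seg ∈ segs, ∃ a ls, seg.2 = a :: ls ∧ a ≠ ""

theorem pvEmit_eq (seg : Bool × List String) :
    pvEmit seg = [("content", pvContentOf seg), ("type", pvTypeOf seg)] := by
  obtain ⟨b, ls⟩ := seg; cases b <;> rfl

theorem pv_join_singleton (x : String) : PySem.Str.join "\n" [x] = x := by
  apply String.ext
  simp [PySem.Str.toList_join, PySem.Chars.join_singleton]

theorem pv_chars_join_concat (sep : List Char) (a : List Char) (ls : List (List Char))
    (x : List Char) :
    PySem.Chars.join sep ((a :: ls) ++ [x]) = PySem.Chars.join sep (a :: ls) ++ sep ++ x := by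
  induction ls generalizing a with
  | nil => simp [PySem.Chars.join_cons_cons, PySem.Chars.join_singleton]
  | cons b bs ih =>
      rw [List.cons_append, List.cons_append, PySem.Chars.join_cons_cons, ← List.cons_append,
        ih b, PySem.Chars.join_cons_cons]
      simp [List.append_assoc]

theorem pv_join_concat (a : String) (ls : List String) (x : String) :
    PySem.Str.join "\n" ((a :: ls) ++ [x]) = PySem.Str.join "\n" (a :: ls) ++ "\n" ++ x := by
  apply String.ext
  simp only [PySem.Str.toList_join, String.toList_append, List.map_append, List.map_cons,
    List.map_nil]
  exact pv_chars_join_concat _ _ _ _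

theorem pv_join_concat' (a : String) (ls : List String) (x : String) :
    PySem.Str.join "\n" (a :: (ls ++ [x])) = PySem.Str.join "\n" (a :: ls) ++ "\n" ++ x := by
  rw [← List.cons_append]
  exact pv_join_concat a ls x

theorem pv_content_ne (b : Bool) (a : String) (ls : List String) (ha : a ≠ "") :
    pvContentOf (b, a :: ls) ≠ "" := by
  have hta : a.toList ≠ [] := fun h => ha (by apply String.ext; simp [h])
  intro h
  have hc := congrArg String.toList h
  cases b with
  | false => simp [pvContentOf, PySem.Str.toList_join] at hc
  | true =>
      rw [show pvContentOf (true, a :: ls) = PySem.Str.join "\n" (a :: ls) from rfl] at hc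
      rw [PySem.Str.toList_join] at hc
      cases ls with
      | nil => exact hta (by simpa [PySem.Chars.join_singleton] using hc)
      | cons c cs =>
          rw [List.map_cons, List.map_cons, PySem.Chars.join_cons_cons] at hc
          simp at hc

theorem pv_strip_ne (line : String) (h : PySem.Str.strip line ≠ "") : line ≠ "" := by
  intro he; subst he; exact h rfl

theorem pv_upperChar_colon (c : Char) (h : PySem.Chars.upperChar c = ':') : c = ':' := by
  unfold PySem.Chars.upperChar at h
  split at h
  · exfalso
    rename_i hl
    unfold PySem.Chars.islower at hl
    simp only [Bool.and_eq_true, decide_eq_true_eq] at hl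
    have h1 : (97 : Nat) ≤ c.toNat := hl.1
    have h2 : c.toNat ≤ 122 := hl.2
    have hv : Nat.isValidChar (c.toNat - 32) := Or.inl (by omega)
    have ht := congrArg Char.toNat h
    rw [Char.toNat_ofNat, if_pos hv] at ht
    have h58 : (':').toNat = 58 := rfl
    omega
  · exact h

theorem pv_mem_isIn (s : String) (h : ':' ∈ s.toList) : PySem.Str.isIn ":" s = true := by
  rw [PySem.Str.isIn_iff_infix]
  obtain ⟨l1, l2, hsplit⟩ := List.mem_iff_append.mp h
  rw [hsplit]
  exact ⟨l1, l2, by simp⟩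

theorem pv_colon_of_infix (m line : String) (hm : ':' ∈ m.toList)
    (h : PySem.Str.isIn m (PySem.Str.upper line) = true) :
    PySem.Str.isIn ":" line = true := by
  have hinf := (PySem.Str.isIn_iff_infix m (PySem.Str.upper line)).mp h
  have hmem : ':' ∈ (PySem.Str.upper line).toList := hinf.subset hm
  rw [PySem.Str.toList_upper] at hmem
  unfold PySem.Chars.upper at hmem
  obtain ⟨c, hc, hcq⟩ := List.mem_map.mp hmem
  have := pv_upperChar_colon c hcq
  subst this
  exact pv_mem_isIn line hc

theorem pv_hit_colon (line : String) (h : pvHit line = true) :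
    PySem.Str.isIn ":" line = true := by
  unfold pvHit pvMarkers at h
  simp only [List.any_cons, List.any_nil, Bool.or_eq_true, Bool.or_false] at h
  rcases h with h | h | h | h
  · exact pv_colon_of_infix _ _ (by decide) h
  · exact pv_colon_of_infix _ _ (by decide) h
  · exact pv_colon_of_infix _ _ (by decide) h
  · exact pv_colon_of_infix _ _ (by decide) h

theorem pv_step (segs : List (Bool × List String)) (hg : pvGood segs) (line : String) :
    pvStepA (pvToA segs) line = pvToA (pvSegStep segs line) ∧ pvGood (pvSegStep segs line) := by
  by_cases hs : PySem.Str.strip line = ""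
  · constructor
    · simp [pvStepA, pvSegStep, hs, pvToA]
    · simpa [pvSegStep, hs] using hg
  · have hlne : line ≠ "" := pv_strip_ne line hs
    by_cases hh : pvHit line = true
    · -- marker line: B starts a new segment, A flushes (when nonempty) and restarts
      have htype : pvSecType line = pvTypeOf (true, [line]) := by
        unfold pvSecType
        rw [if_pos (pv_hit_colon line hh)]
        rfl
      refine ⟨?_, ?_⟩
      · rcases List.eq_nil_or_concat segs with he | ⟨init, l, he⟩
        · subst he
          simp [pvStepA, pvSegStep, pvToA, hs, hh, pv_join_singleton, pvContentOf, htype]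
        · subst he
          simp only [List.concat_eq_append]
          obtain ⟨b, l2⟩ := l
          obtain ⟨a, ls, hsa, hane⟩ := hg (b, l2) (by simp)
          simp only at hsa; subst hsa
          have hcne : pvContentOf (b, a :: ls) ≠ "" := pv_content_ne b a ls hane
          have hBeq : pvSegStep (init ++ [(b, a :: ls)]) line
              = (init ++ [(b, a :: ls)]) ++ [((true : Bool), [line])] := by
            simp [pvSegStep, hs, hh]
          rw [hBeq]
          simp only [pvToA, List.getLast?_concat, List.dropLast_concat]
          cases b with
          | true =>
              have hc2 : PySem.Str.join "\n" (a :: ls) ≠ "" := hcne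
              simp [pvStepA, hs, hh, hc2, pvEmit_eq, pvContentOf, pv_join_singleton, htype]
          | false =>
              have hc2 : "\n" ++ PySem.Str.join "\n" (a :: ls) ≠ "" := hcne
              simp [pvStepA, hs, hh, hc2, pvEmit_eq, pvContentOf, pv_join_singleton, htype]
      · intro seg hseg
        simp only [pvSegStep, if_neg hs, if_pos hh] at hseg
        rcases List.mem_append.mp hseg with h1 | h1
        · exact hg seg h1
        · simp at h1; subst h1; exact ⟨line, [], rfl, hlne⟩
    · -- ordinary line: B appends to the last segment (or starts the leading group)
      rcases List.eq_nil_or_concat segs with he | ⟨init, l, he⟩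
      · subst he
        constructor
        · simp [pvStepA, pvSegStep, pvToA, hs, hh, pv_join_singleton, pvContentOf, pvTypeOf]
        · intro seg hseg
          simp only [pvSegStep, if_neg hs, if_neg hh] at hseg
          simp at hseg; subst hseg; exact ⟨line, [], rfl, hlne⟩
      · subst he
        simp only [List.concat_eq_append] at hg ⊢
        obtain ⟨b, l2⟩ := l
        obtain ⟨a, ls, hsa, hane⟩ := hg (b, l2) (by simp)
        simp only at hsa; subst hsa
        have hB : pvSegStep (init ++ [(b, a :: ls)]) line
            = init ++ [(b, (a :: ls) ++ [line])] := by
          simp only [pvSegStep, if_neg hs, if_neg hh]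
          rw [if_pos (by simp)]
          simp
        constructor
        · rw [hB]
          simp only [pvToA, List.getLast?_concat, List.dropLast_concat]
          cases b with
          | true =>
              simp [pvStepA, hs, hh, pvContentOf, pvTypeOf]
              rw [pv_join_concat']
          | false =>
              simp [pvStepA, hs, hh, pvContentOf, pvTypeOf]
              rw [pv_join_concat']
              simp [String.append_assoc]
        · rw [hB]
          intro seg hseg
          rcases List.mem_append.mp hseg with h1 | h1
          · exact hg seg (by simp [h1])
          · simp at h1; subst h1; exact ⟨a, ls ++ [line], by simp, hane⟩

theorem pv_fold (lines : List String) (segs : List (Bool × List String)) (hg : pvGood segs) :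
    lines.foldl pvStepA (pvToA segs) = pvToA (lines.foldl pvSegStep segs) ∧
      pvGood (lines.foldl pvSegStep segs) := by
  induction lines generalizing segs with
  | nil => exact ⟨rfl, hg⟩
  | cons l ls ih =>
      obtain ⟨h1, h2⟩ := pv_step segs hg l
      simpa [List.foldl_cons, h1] using ih _ h2

-- ===== VERDICT (by name: the statement is the Claim_ definition above) =====
theorem parse_script_sections_spec : Claim_equal_parse_script_sections := by
  intro script _
  unfold Spec_parse_script_sections parse_script_sections parse_script_sections_alt
  obtain ⟨h1, h2⟩ := pv_fold ((PySem.Str.split? script "\n").getD []) [] (by intro s hs; cases hs)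
  have h0 : pvToA [] = ([], "", "intro") := rfl
  rw [h0] at h1
  rw [h1]
  set segsF := ((PySem.Str.split? script "\n").getD []).foldl pvSegStep [] with hsegs
  rcases List.eq_nil_or_concat segsF with he | ⟨init, l, he⟩
  · rw [he]; rfl
  · rw [he]
    have hl : l ∈ segsF := by rw [he]; simp
    obtain ⟨a, ls, hsa, hane⟩ := h2 l hl
    have hcne : pvContentOf l ≠ "" := by
      have := pv_content_ne l.1 a ls hane
      rwa [← hsa, Prod.mk.eta] at this
    simp only [List.concat_eq_append, pvToA, List.getLast?_concat, List.dropLast_concat]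
    rw [if_pos hcne]
    simp [pvEmit_eq]
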